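-- pv_equiv track=rewrite | github.com/wuc9521/moss-python | winnowing.py | get_line_index_table
-- ===== SOURCE A (Python) =====
-- def get_line_index_table(text: str):
--     idx = -1
--     p = 0
--     line_index_table = []  # 第i个元素的值v  代表  第i行的终止元素在处理后的字符串中的位置v
--     while p < len(text):
--         if text[p] != '\n':
--             idx += 1
--         else:
--             line_index_table.append(idx)
--         p += 1
--     return line_index_table
-- ===== SOURCE B (Python) =====
-- def get_line_index_table(text: str):
--     positions = [p for p, c in enumerate(text) if c == '\n']
--     return [p - k - 1 for k, p in enumerate(positions)]
-- ===== Notes on version B (the rewrite author's own statement) =====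
-- stated objective: alternative
-- what changed: B replaces A's running non-newline counter threaded through a per-character while loop with a two-stage comprehension: collect the newline positions, then compute each table entry arithmetically as p - k - 1 from the k-th newline's position p.
import Mathlib
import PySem

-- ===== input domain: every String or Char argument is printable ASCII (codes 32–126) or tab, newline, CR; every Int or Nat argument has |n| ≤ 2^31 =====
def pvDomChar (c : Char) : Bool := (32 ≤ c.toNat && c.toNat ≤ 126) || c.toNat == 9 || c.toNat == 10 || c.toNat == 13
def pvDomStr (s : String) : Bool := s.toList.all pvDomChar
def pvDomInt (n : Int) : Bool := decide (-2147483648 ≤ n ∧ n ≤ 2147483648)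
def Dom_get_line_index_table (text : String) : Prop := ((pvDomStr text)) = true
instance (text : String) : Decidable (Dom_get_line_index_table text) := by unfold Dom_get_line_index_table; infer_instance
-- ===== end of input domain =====

-- B computes each line-end index arithmetically (p - k - 1) from the enumerated newline
-- positions instead of threading A's running non-newline counter through a character loop.


-- ===== PORT A =====
-- while p < len(text): if text[p] != '\n': idx += 1 else: table.append(idx); p += 1
def pvALoop : List Char → Int → List Int
  | [], _ => []
  | c :: rest, idx => if c ≠ '\n' then pvALoop rest (idx + 1) else idx :: pvALoop rest idx

def get_line_index_table (text : String) : List Int := pvALoop text.toList (-1)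

-- ===== PORT B =====
-- positions = [p for p, c in enumerate(text) if c == '\n']; [p - k - 1 for k, p in enumerate(positions)]
def get_line_index_table_alt (text : String) : List Int :=
  let positions : List Int :=
    ((PySem.List.enumerate text.toList 0).filter (fun pc => pc.2 == '\n')).map (·.1)
  (PySem.List.enumerate positions 0).map (fun kp => kp.2 - kp.1 - 1)

-- ===== PRECONDITION & SPEC =====
def Spec_get_line_index_table (text : String) (out : List Int) : Prop := out = get_line_index_table_alt text
instance (text : String) (out : List Int) : Decidable (Spec_get_line_index_table text out) := by unfold Spec_get_line_index_table; infer_instance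

-- ===== CLAIM (what is proved, stated in full; the proofs are below) =====
def Claim_equal_get_line_index_table : Prop := ∀ (text : String), Dom_get_line_index_table text → Spec_get_line_index_table text (get_line_index_table text)

-- ===== LEMMAS AND PROOFS =====
-- Invariant: after scanning s characters of which k were newlines, A's idx equals s - k - 1.
theorem pvALoop_eq (cs : List Char) : ∀ (s k : Int),
    pvALoop cs (s - k - 1) =
      (PySem.List.enumerate
        (((PySem.List.enumerate cs s).filter (fun pc => pc.2 == '\n')).map (·.1)) k).map
        (fun kp => kp.2 - kp.1 - 1) := by
  induction cs with
  | nil => intro s k; simp [pvALoop, PySem.List.enumerate_nil]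
  | cons c rest ih =>
    intro s k
    by_cases h : c = '\n'
    · subst h
      have h1 : s - k - 1 = (s + 1) - (k + 1) - 1 := by ring
      simp only [pvALoop, ne_eq, not_true_eq_false, if_false, PySem.List.enumerate_cons,
        List.filter_cons, beq_self_eq_true, if_true, List.map_cons]
      rw [h1, ih (s + 1) (k + 1)]
    · have h1 : s - k - 1 + 1 = (s + 1) - k - 1 := by ring
      have hb : ((c == '\n') = true) = False := by simp [h]
      simp only [pvALoop, ne_eq, h, not_false_eq_true, if_true, PySem.List.enumerate_cons,
        List.filter_cons, hb, if_false]
      rw [h1, ih (s + 1) k]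

-- ===== VERDICT (by name: the statement is the Claim_ definition above) =====
theorem get_line_index_table_spec : Claim_equal_get_line_index_table := by
  intro text _
  unfold Spec_get_line_index_table get_line_index_table get_line_index_table_alt
  have := pvALoop_eq text.toList 0 0
  simpa using this
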